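-- pv_equiv track=rewrite | github.com/lvnkae/garnet-lib | python/python27/html_parser_utility.py | splitBySPCRLF
-- ===== SOURCE A (Python) =====
-- def splitBySPCRLF(src):
--     ret_str = []
--     div_lf = src.split('\n');
--     for str_div_lf in div_lf:
--         if str_div_lf:
--             div_sp = str_div_lf.split(' ')
--             for str_div_sp in div_sp:
--                 if str_div_sp:
--                     if not str_div_sp == '\r':
--                         ret_str.append(str_div_sp)
--     return ret_str
-- ===== SOURCE B (Python) =====
-- def splitBySPCRLF(src):
--     # single left-to-right scan with a token buffer instead of nested split loops
--     ret = []
--     cur = []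
--     for c in src:
--         if c == ' ' or c == '\n':
--             t = ''.join(cur)
--             if t and t != '\r':
--                 ret.append(t)
--             cur = []
--         else:
--             cur.append(c)
--     t = ''.join(cur)
--     if t and t != '\r':
--         ret.append(t)
--     return ret
-- ===== Notes on version B (the rewrite author's own statement) =====
-- stated objective: alternative
-- what changed: Replaces the nested split-on-newline / split-on-space loops by a single character-level scan that accumulates a token buffer and flushes it on ' ' or '\n', dropping empty and exact-'\r' tokens.
import Mathlib
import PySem

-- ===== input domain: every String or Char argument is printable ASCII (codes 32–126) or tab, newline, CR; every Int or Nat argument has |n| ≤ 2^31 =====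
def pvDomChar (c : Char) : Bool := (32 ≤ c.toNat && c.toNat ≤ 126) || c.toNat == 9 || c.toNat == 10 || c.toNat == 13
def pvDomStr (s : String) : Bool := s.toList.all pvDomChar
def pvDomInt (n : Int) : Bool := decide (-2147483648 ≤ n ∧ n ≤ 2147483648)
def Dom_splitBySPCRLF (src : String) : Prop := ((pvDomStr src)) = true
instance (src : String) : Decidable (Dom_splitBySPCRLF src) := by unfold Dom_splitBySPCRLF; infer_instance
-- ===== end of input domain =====

-- B replaces A's nested split-on-'\n' / split-on-' ' loops by a single character scan
-- with a token buffer flushed at each delimiter (same O(n) cost, different decomposition).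


-- ===== PORT A =====
def splitBySPCRLF (src : String) : List String :=
  let div_lf := (PySem.Str.split? src "\n").getD []   -- sep ≠ "", so split? never returns none
  div_lf.foldl (fun ret str_div_lf =>
    if str_div_lf ≠ "" then
      ((PySem.Str.split? str_div_lf " ").getD []).foldl (fun ret str_div_sp =>
        if str_div_sp ≠ "" then
          if str_div_sp ≠ "\r" then ret ++ [str_div_sp] else ret
        else ret) ret
    else ret) []

-- ===== PORT B =====
def pvFlush (cur : List Char) : List String :=
  let t := String.ofList cur
  if t ≠ "" ∧ t ≠ "\r" then [t] else []

def pvStep (st : List String × List Char) (c : Char) : List String × List Char :=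
  if c = ' ' ∨ c = '\n' then (st.1 ++ pvFlush st.2, []) else (st.1, st.2 ++ [c])

def splitBySPCRLF_alt (src : String) : List String :=
  let st := src.toList.foldl pvStep ([], [])
  st.1 ++ pvFlush st.2

-- ===== PRECONDITION & SPEC =====
def Spec_splitBySPCRLF (src : String) (out : List String) : Prop := out = splitBySPCRLF_alt src
instance (src : String) (out : List String) : Decidable (Spec_splitBySPCRLF src out) := by unfold Spec_splitBySPCRLF; infer_instance

-- ===== CLAIM (what is proved, stated in full; the proofs are below) =====
def Claim_equal_splitBySPCRLF : Prop := ∀ (src : String), Dom_splitBySPCRLF src → Spec_splitBySPCRLF src (splitBySPCRLF src)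

-- ===== LEMMAS AND PROOFS =====

-- prepend `pre` to the first piece (a split result is never empty, but totalize)
def pvConsHead (pre : List Char) : List (List Char) → List (List Char)
  | [] => [pre]
  | p :: ps => (pre ++ p) :: ps

-- simple structural split on one delimiter character
def pvSplitCh (d : Char) : List Char → List (List Char)
  | [] => [[]]
  | c :: cs => if c = d then [] :: pvSplitCh d cs else pvConsHead [c] (pvSplitCh d cs)

-- split on either delimiter in one pass
def pvSplitBoth : List Char → List (List Char)
  | [] => [[]]
  | c :: cs => if c = ' ' ∨ c = '\n' then [] :: pvSplitBoth cs else pvConsHead [c] (pvSplitBoth cs)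

def pvPred (t : List Char) : Bool := decide (t ≠ [] ∧ t ≠ ['\r'])

theorem pvSplitCh_ne_nil (d : Char) (cs : List Char) : pvSplitCh d cs ≠ [] := by
  cases cs with
  | nil => simp [pvSplitCh]
  | cons c cs =>
    simp only [pvSplitCh]
    split
    · simp
    · cases h : pvSplitCh d cs <;> simp [pvConsHead]

theorem pvSplitBoth_ne_nil (cs : List Char) : pvSplitBoth cs ≠ [] := by
  cases cs with
  | nil => simp [pvSplitBoth]
  | cons c cs =>
    simp only [pvSplitBoth]
    split
    · simp
    · cases h : pvSplitBoth cs <;> simp [pvConsHead]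

theorem pvConsHead_nil_of_ne {xs : List (List Char)} (h : xs ≠ []) : pvConsHead [] xs = xs := by
  cases xs with
  | nil => exact absurd rfl h
  | cons p ps => simp [pvConsHead]

theorem pvConsHead_comp (a b : List Char) (xs : List (List Char)) :
    pvConsHead a (pvConsHead b xs) = pvConsHead (a ++ b) xs := by
  cases xs <;> simp [pvConsHead]

theorem pvConsHead_append {xs : List (List Char)} (a : List Char) (ys : List (List Char))
    (h : xs ≠ []) : pvConsHead a xs ++ ys = pvConsHead a (xs ++ ys) := by
  cases xs with
  | nil => exact absurd rfl h
  | cons p ps => simp [pvConsHead]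

-- fuelled splitOn.go with a single-character separator computes pvSplitCh
theorem pvGo_single (d : Char) (l : List Char) : ∀ (fuel : Nat) (cur : List Char)
    (acc : List (List Char)), l.length ≤ fuel →
    PySem.Chars.splitOn.go [d] fuel l cur acc =
      acc.reverse ++ pvConsHead cur.reverse (pvSplitCh d l) := by
  induction l with
  | nil =>
    intro fuel cur acc _
    cases fuel <;> simp [PySem.Chars.splitOn.go, pvSplitCh, pvConsHead]
  | cons c rest ih =>
    intro fuel cur acc hle
    cases fuel with
    | zero => simp at hle
    | succ fuel =>
      rw [PySem.Chars.splitOn.go]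
      by_cases hc : d = c
      · subst hc
        have hpre : List.isPrefixOf [d] (d :: rest) = true := by
          simp [List.isPrefixOf]
        rw [if_pos hpre]
        simp only [List.length_cons] at hle
        simp only [List.length_singleton, List.drop_succ_cons, List.drop_zero]
        rw [ih fuel [] (cur.reverse :: acc) (by omega)]
        have hne := pvSplitCh_ne_nil d rest
        simp only [List.reverse_nil, pvConsHead_nil_of_ne hne,
          show pvSplitCh d (d :: rest) = [] :: pvSplitCh d rest from by simp [pvSplitCh]]
        simp [pvConsHead]
      · have hpre : List.isPrefixOf [d] (c :: rest) = false := by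
          simp only [List.isPrefixOf]
          simp [hc]
        rw [if_neg (by simp [hpre])]
        simp only [List.length_cons] at hle
        rw [ih fuel (c :: cur) acc (by omega)]
        have : (c :: cur).reverse = cur.reverse ++ [c] := by simp
        rw [this, ← pvConsHead_comp]
        have hcd : ¬ c = d := fun h => hc h.symm
        simp [pvSplitCh, hcd]

theorem pvSplitOn_single (d : Char) (cs : List Char) :
    PySem.Chars.splitOn cs [d] = pvSplitCh d cs := by
  unfold PySem.Chars.splitOn
  rw [pvGo_single d cs (cs.length + 1) [] [] (by omega)]
  simp [pvConsHead_nil_of_ne (pvSplitCh_ne_nil d cs)]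

-- splitting on '\n' then on ' ' piecewise equals the one-pass two-delimiter split
theorem pvFlatMap_split (cs : List Char) :
    (pvSplitCh '\n' cs).flatMap (pvSplitCh ' ') = pvSplitBoth cs := by
  induction cs with
  | nil => simp [pvSplitCh, pvSplitBoth]
  | cons c cs ih =>
    by_cases hn : c = '\n'
    · subst hn
      rw [show pvSplitCh '\n' ('\n' :: cs) = [] :: pvSplitCh '\n' cs from by simp [pvSplitCh],
          show pvSplitBoth ('\n' :: cs) = [] :: pvSplitBoth cs from by simp [pvSplitBoth]]
      simp only [List.flatMap_cons, ih]
      simp [pvSplitCh]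
    · obtain ⟨p, ps, hps⟩ : ∃ p ps, pvSplitCh '\n' cs = p :: ps := by
        cases h : pvSplitCh '\n' cs with
        | nil => exact absurd h (pvSplitCh_ne_nil _ _)
        | cons p ps => exact ⟨p, ps, rfl⟩
      rw [hps] at ih
      simp only [List.flatMap_cons] at ih
      have hsplit : pvSplitCh '\n' (c :: cs) = pvConsHead [c] (p :: ps) := by
        rw [← hps]; simp [pvSplitCh, hn]
      by_cases hs : c = ' '
      · subst hs
        rw [hsplit]
        simp only [pvConsHead, List.flatMap_cons]
        rw [show pvSplitCh ' ' ([' '] ++ p) = [] :: pvSplitCh ' ' p from by simp [pvSplitCh],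
            show pvSplitBoth (' ' :: cs) = [] :: pvSplitBoth cs from by simp [pvSplitBoth]]
        simp [ih]
      · rw [hsplit]
        simp only [pvConsHead, List.flatMap_cons]
        rw [show pvSplitCh ' ' ([c] ++ p) = pvConsHead [c] (pvSplitCh ' ' p) from by
              simp [pvSplitCh, hs],
            pvConsHead_append [c] _ (pvSplitCh_ne_nil ' ' p), ih,
            show pvSplitBoth (c :: cs) = pvConsHead [c] (pvSplitBoth cs) from by
              simp [pvSplitBoth, hn, hs]]

def pvPredS (t : String) : Bool := decide (t ≠ "" ∧ t ≠ "\r")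

theorem pvPredS_ofList (t : List Char) : pvPredS (String.ofList t) = pvPred t := by
  unfold pvPredS pvPred
  have h1 : (String.ofList t = "") ↔ t = [] := by simp
  have h2 : (String.ofList t = "\r") ↔ t = [Char.ofNat 13] := by
    constructor
    · intro h; have := congrArg String.toList h; simpa using this
    · intro h; subst h; rfl
  have h3 : ('\r' : Char) = Char.ofNat 13 := rfl
  simp [h1, h2]

-- A's inner token loop appends the filtered tokens
theorem pvInnerA (toks : List String) (ret : List String) :
    toks.foldl (fun ret t =>
      if t ≠ "" then (if t ≠ "\r" then ret ++ [t] else ret) else ret) ret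
    = ret ++ toks.filter pvPredS := by
  induction toks generalizing ret with
  | nil => simp
  | cons t ts ih =>
    simp only [List.foldl_cons, List.filter_cons, ih]
    by_cases h1 : t = ""
    · simp [h1, pvPredS]
    · by_cases h2 : t = "\r"
      · simp [h2, pvPredS]
      · simp [h1, h2, pvPredS]

-- tokens contributed by one line of A
def pvLineToks (l : List Char) : List String :=
  ((pvSplitCh ' ' l).map String.ofList).filter pvPredS

theorem pvOuterA (lines : List (List Char)) (ret : List String) :
    lines.foldl (fun ret l =>
      if String.ofList l ≠ "" then
        (((PySem.Str.split? (String.ofList l) " ").getD []).foldl (fun ret t =>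
          if t ≠ "" then (if t ≠ "\r" then ret ++ [t] else ret) else ret) ret)
      else ret) ret
    = ret ++ lines.flatMap pvLineToks := by
  induction lines generalizing ret with
  | nil => simp
  | cons l ls ih =>
    simp only [List.foldl_cons, List.flatMap_cons, ih]
    by_cases h : String.ofList l = ""
    · have hl : l = [] := by simpa using h
      subst hl
      simp [h, pvLineToks, pvSplitCh, pvPredS]
    · have hsplit : (PySem.Str.split? (String.ofList l) " ").getD []
          = (pvSplitCh ' ' l).map String.ofList := by
        simp [PySem.Str.split?, PySem.Chars.split?,
          show (" " : String).toList = [' '] from rfl, pvSplitOn_single]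
      simp only [ne_eq, h, not_false_eq_true, if_true, hsplit, pvInnerA]
      simp [pvLineToks]

theorem pvLineToks_flat (L : List (List Char)) :
    L.flatMap pvLineToks = ((L.flatMap (pvSplitCh ' ')).filter pvPred).map String.ofList := by
  induction L with
  | nil => simp
  | cons l ls ih =>
    simp only [List.flatMap_cons, List.filter_append, List.map_append, ih]
    congr 1
    unfold pvLineToks
    rw [List.filter_map]
    congr 1
    apply List.filter_congr
    intro t _
    exact (pvPredS_ofList t : (pvPredS ∘ String.ofList) t = pvPred t)

theorem pvA_char (src : String) :
    splitBySPCRLF src = ((pvSplitBoth src.toList).filter pvPred).map String.ofList := by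
  unfold splitBySPCRLF
  have hlf : (PySem.Str.split? src "\n").getD []
      = (pvSplitCh '\n' src.toList).map String.ofList := by
    simp [PySem.Str.split?, PySem.Chars.split?,
      show ("\n" : String).toList = ['\n'] from rfl, pvSplitOn_single]
  rw [hlf]
  have h := pvOuterA (pvSplitCh '\n' src.toList) []
  simp only [List.foldl_map] at h ⊢
  rw [h, List.nil_append, pvLineToks_flat, pvFlatMap_split]

theorem pvFlush_eq (cur : List Char) :
    pvFlush cur = (List.filter pvPred [cur]).map String.ofList := by
  unfold pvFlush
  rw [show (if String.ofList cur ≠ "" ∧ String.ofList cur ≠ "\r"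
        then [String.ofList cur] else []) =
      (if pvPredS (String.ofList cur) then [String.ofList cur] else []) from by
    simp [pvPredS]]
  rw [pvPredS_ofList]
  by_cases h : pvPred cur <;> simp [h]

theorem pvB_char (cs : List Char) : ∀ (toks : List String) (cur : List Char),
    (cs.foldl pvStep (toks, cur)).1 ++ pvFlush (cs.foldl pvStep (toks, cur)).2
    = toks ++ ((pvConsHead cur (pvSplitBoth cs)).filter pvPred).map String.ofList := by
  induction cs with
  | nil =>
    intro toks cur
    simp [pvSplitBoth, pvConsHead, pvFlush_eq]
  | cons c cs ih =>
    intro toks cur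
    simp only [List.foldl_cons]
    by_cases hd : c = ' ' ∨ c = '\n'
    · rw [show pvStep (toks, cur) c = (toks ++ pvFlush cur, []) from by
        simp [pvStep, hd]]
      rw [ih]
      simp only [pvSplitBoth, if_pos hd]
      rw [pvConsHead_nil_of_ne (pvSplitBoth_ne_nil cs)]
      simp only [pvConsHead]
      rw [pvFlush_eq]
      simp [List.filter_cons]
      by_cases h : pvPred cur <;> simp [h]
    · rw [show pvStep (toks, cur) c = (toks, cur ++ [c]) from by
        simp [pvStep, hd]]
      rw [ih]
      simp only [pvSplitBoth, if_neg hd]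
      rw [pvConsHead_comp]

-- ===== VERDICT (by name: the statement is the Claim_ definition above) =====
theorem splitBySPCRLF_spec : Claim_equal_splitBySPCRLF := by
  intro src _
  unfold Spec_splitBySPCRLF splitBySPCRLF_alt
  rw [pvA_char src]
  rw [pvB_char src.toList [] []]
  rw [pvConsHead_nil_of_ne (pvSplitBoth_ne_nil src.toList)]
  simp
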